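-- pv_equiv track=rewrite | github.com/tookender/Korii-Bot | utils/dq/calculators.py | calculate_potential
-- ===== SOURCE A (Python) =====
-- def calculate_potential(power, current, total):
--     """
--     Calculate the potential of an item.
--
--     Parameters:
--     power (int): The current power of the item.
--     current (int): The current amount of upgrades on the item.
--     total (int): The total amount of upgrades available for the item.
--
--     Returns:
--     int: The potential of the item.
--     """
--     potential = power
--     upgrades = current
--     while potential < 200 and upgrades < total:
--         if potential < 20:
--             potential += 1
--         else:
--             potential += potential // 20
--         upgrades += 1
--     potential += (total - upgrades) * 10
--     return potential
-- ===== SOURCE B (Python) =====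
-- def calculate_potential(power, current, total):
--     budget = total - current
--     # Closed form for the linear phase: below 20 each upgrade adds exactly 1,
--     # so the number of such steps is clamp(20 - power, 0, budget).
--     lin = max(0, min(20 - power, budget))
--
--     # Compounding phase as tail recursion; the base case folds in the
--     # "+10 per unused upgrade" final adjustment.
--     def compound(p, rem):
--         if p >= 200 or rem <= 0:
--             return p + rem * 10
--         return compound(p + p // 20, rem - 1)
--
--     return compound(power + lin, budget - lin)
-- ===== Notes on version B (the rewrite author's own statement) =====
-- stated objective: alternative
-- what changed: A simulates every upgrade step; B computes the linear phase in closed form (clamp(20-power, 0, budget)) and runs only the compounding phase as a tail recursion whose base case folds in the final +10-per-unused-upgrade adjustment.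
import Mathlib
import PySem

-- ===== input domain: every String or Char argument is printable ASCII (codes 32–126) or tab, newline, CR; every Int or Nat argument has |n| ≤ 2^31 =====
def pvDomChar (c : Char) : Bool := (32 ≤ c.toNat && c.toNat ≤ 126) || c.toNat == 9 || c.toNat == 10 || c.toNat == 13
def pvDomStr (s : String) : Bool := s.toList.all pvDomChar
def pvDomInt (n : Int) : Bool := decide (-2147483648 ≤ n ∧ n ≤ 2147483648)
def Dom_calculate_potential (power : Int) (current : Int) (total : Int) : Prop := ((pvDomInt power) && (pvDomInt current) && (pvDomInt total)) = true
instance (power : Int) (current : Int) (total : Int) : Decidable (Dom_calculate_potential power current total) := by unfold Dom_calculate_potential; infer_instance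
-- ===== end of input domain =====

-- B replaces A's step-by-step linear phase by a closed-form clamp and runs the compounding
-- phase as a tail recursion whose base case folds in the final +10-per-unused-upgrade term.

-- ===== PORT A =====
-- A's while-loop over state (potential, upgrades); terminates since upgrades increases towards total.
def pvLoopA (potential upgrades total : Int) : Int × Int :=
  if potential < 200 ∧ upgrades < total then
    pvLoopA (if potential < 20 then potential + 1 else potential + PySem.Int.floordiv potential 20) (upgrades + 1) total
  else (potential, upgrades)
termination_by (total - upgrades).toNat
decreasing_by omega

def calculate_potential (power : Int) (current : Int) (total : Int) : Int :=
  let s := pvLoopA power current total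
  s.1 + (total - s.2) * 10

-- ===== PORT B =====
-- B's helper `compound`: tail recursion, base case returns p + rem * 10.
def pvCompound (p rem : Int) : Int :=
  if 200 ≤ p ∨ rem ≤ 0 then p + rem * 10
  else pvCompound (p + PySem.Int.floordiv p 20) (rem - 1)
termination_by rem.toNat
decreasing_by omega

def calculate_potential_alt (power : Int) (current : Int) (total : Int) : Int :=
  let budget := total - current
  let lin := max 0 (min (20 - power) budget)
  pvCompound (power + lin) (budget - lin)

-- ===== PRECONDITION & SPEC =====
def Spec_calculate_potential (power : Int) (current : Int) (total : Int) (out : Int) : Prop := out = calculate_potential_alt power current total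
instance (power : Int) (current : Int) (total : Int) (out : Int) : Decidable (Spec_calculate_potential power current total out) := by unfold Spec_calculate_potential; infer_instance

-- ===== CLAIM (what is proved, stated in full; the proofs are below) =====
def Claim_equal_calculate_potential : Prop := ∀ (power : Int) (current : Int) (total : Int), Dom_calculate_potential power current total → Spec_calculate_potential power current total (calculate_potential power current total)

-- ===== LEMMAS AND PROOFS =====

-- If potential ≥ 20 then potential // 20 ≥ 1.
theorem pvFloordiv_ge_one (potential : Int) (h : 20 ≤ potential) :
    1 ≤ PySem.Int.floordiv potential 20 := by
  have := PySem.Int.le_floordiv_iff_mul_le (a := potential) (b := 20) (q := 1) (by omega)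
  omega

-- Main invariant: A's loop followed by the final adjustment equals B's clamp + compound.
theorem pvLoopA_eq_compound (potential upgrades total : Int) :
    (pvLoopA potential upgrades total).1 + (total - (pvLoopA potential upgrades total).2) * 10
      = pvCompound (potential + max 0 (min (20 - potential) (total - upgrades)))
          ((total - upgrades) - max 0 (min (20 - potential) (total - upgrades))) := by
  by_cases hg : potential < 200 ∧ upgrades < total
  · by_cases h20 : potential < 20
    · -- linear step: clamp shrinks by exactly one on both sides
      rw [pvLoopA]
      simp only [if_pos hg, if_pos h20]
      rw [pvLoopA_eq_compound (potential + 1) (upgrades + 1) total]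
      congr 1 <;> omega
    · -- compounding step: clamp is 0 before and after the step
      have h1 := pvFloordiv_ge_one potential (by omega)
      have hc : max 0 (min (20 - potential) (total - upgrades)) = 0 := by omega
      rw [hc, add_zero, sub_zero]
      rw [pvLoopA]
      simp only [if_pos hg, if_neg h20]
      rw [pvLoopA_eq_compound (potential + PySem.Int.floordiv potential 20) (upgrades + 1) total]
      have hc2 : max 0 (min (20 - (potential + PySem.Int.floordiv potential 20)) (total - (upgrades + 1))) = 0 := by omega
      rw [hc2, add_zero, sub_zero]
      conv_rhs => rw [pvCompound]
      rw [if_neg (by omega : ¬ ((200:Int) ≤ potential ∨ total - upgrades ≤ 0))]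
      congr 1
      omega
  · -- loop exits immediately; so does compound, with clamp 0
    have hc : max 0 (min (20 - potential) (total - upgrades)) = 0 := by omega
    rw [hc, add_zero, sub_zero]
    rw [pvLoopA]
    simp only [if_neg hg]
    rw [pvCompound]
    rw [if_pos (by omega : (200:Int) ≤ potential ∨ total - upgrades ≤ 0)]
termination_by (total - upgrades).toNat
decreasing_by all_goals omega

-- ===== VERDICT (by name: the statement is the Claim_ definition above) =====
theorem calculate_potential_spec : Claim_equal_calculate_potential := by
  intro power current total _
  unfold Spec_calculate_potential calculate_potential calculate_potential_alt
  exact pvLoopA_eq_compound power current total
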